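-- pv_equiv track=rewrite | github.com/NutanNepal/small-cpp-c-py-js-hs-java-programs | lengthOfMissing.py | get_length_of_missing_array
-- ===== SOURCE A (Python) =====
-- def get_length_of_missing_array(_list):
--     if not _list:
--         return 0
--     for x in _list:
--         if not x:
--             return 0
--     thelist = sorted(_list)
--     i = len(thelist[0])
--     for x in thelist:
--         if not i + thelist.index(x) == len(x):
--             return i + thelist.index(x)
--     return 0
-- ===== SOURCE B (Python) =====
-- def get_length_of_missing_array(_list):
--     if not _list:
--         return 0
--     if any(not x for x in _list):
--         return 0
--     i = len(min(_list))
--     best = None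
--     for v in _list:
--         c = sum(1 for y in _list if y < v)
--         if i + c != len(v) and (best is None or c < best):
--             best = c
--     return 0 if best is None else i + best
-- ===== Notes on version B (the rewrite author's own statement) =====
-- stated objective: alternative
-- what changed: B never sorts: it computes each element's rank as the count of strictly smaller elements and returns i plus the minimum rank among mismatching values (i = length of the lexicographic minimum), replacing A's sort-then-scan with repeated .index calls.
import Mathlib
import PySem

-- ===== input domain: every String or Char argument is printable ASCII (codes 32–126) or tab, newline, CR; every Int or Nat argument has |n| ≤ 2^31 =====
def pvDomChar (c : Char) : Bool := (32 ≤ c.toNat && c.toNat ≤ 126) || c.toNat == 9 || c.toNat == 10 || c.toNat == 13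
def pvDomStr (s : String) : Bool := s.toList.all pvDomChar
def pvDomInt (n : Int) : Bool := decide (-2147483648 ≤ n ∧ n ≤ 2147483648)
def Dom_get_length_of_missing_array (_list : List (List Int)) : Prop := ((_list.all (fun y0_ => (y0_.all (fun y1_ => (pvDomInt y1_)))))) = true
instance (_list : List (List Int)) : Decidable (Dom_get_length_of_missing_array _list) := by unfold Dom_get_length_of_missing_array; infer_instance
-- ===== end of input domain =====

-- B never sorts: it computes each element's rank (count of strictly smaller elements) and
-- returns i + the minimum rank among mismatching values; objective: alternative algorithm.

-- ===== PORT A =====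
-- `for x in _list: if not x: return 0`
def pvA_anyEmpty : List (List Int) → Bool
  | [] => false
  | x :: xs => if x = [] then true else pvA_anyEmpty xs

-- `for x in thelist: if not i + thelist.index(x) == len(x): return i + thelist.index(x)`
-- (.index always succeeds here since x ∈ thelist, so the getD default is never used)
def pvA_loop (thelist : List (List Int)) (i : Int) : List (List Int) → Int
  | [] => 0
  | x :: xs =>
    let idx : Nat := (PySem.List.index? thelist x).getD 0
    if ¬ (i + (idx : Int) = (x.length : Int)) then i + (idx : Int)
    else pvA_loop thelist i xs

def get_length_of_missing_array (_list : List (List Int)) : Int :=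
  if _list = [] then 0
  else if pvA_anyEmpty _list then 0
  else
    match PySem.List.sorted _list (fun x => x) false with
    | [] => 0
    | h :: t => pvA_loop (h :: t) ((h.length : Int)) (h :: t)

-- ===== PORT B =====
-- the `for v in _list` loop carrying `best`; `sum(1 for y in _list if y < v)` is the 0/1-sum,
-- i.e. the count of strictly smaller elements
def pvB_loop (full : List (List Int)) (i : Int) : Option Int → List (List Int) → Option Int
  | best, [] => best
  | best, v :: rest =>
    let c : Int := (full.countP (fun y => decide (y < v)) : Int)
    if ¬ (i + c = (v.length : Int)) then
      match best with
      | none => pvB_loop full i (some c) rest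
      | some b => if c < b then pvB_loop full i (some c) rest else pvB_loop full i best rest
    else pvB_loop full i best rest

def get_length_of_missing_array_alt (_list : List (List Int)) : Int :=
  if _list = [] then 0
  else if _list.any (fun x => decide (x = [])) then 0
  else
    match PySem.List.min? _list (fun x => x) with
    | none => 0
    | some m =>
      match pvB_loop _list ((m.length : Int)) none _list with
      | none => 0
      | some c => (m.length : Int) + c

-- ===== PRECONDITION & SPEC =====
def Spec_get_length_of_missing_array (_list : List (List Int)) (out : Int) : Prop := out = get_length_of_missing_array_alt _list
instance (_list : List (List Int)) (out : Int) : Decidable (Spec_get_length_of_missing_array _list out) := by unfold Spec_get_length_of_missing_array; infer_instance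

-- ===== CLAIM (what is proved, stated in full; the proofs are below) =====
def Claim_equal_get_length_of_missing_array : Prop := ∀ (_list : List (List Int)), Dom_get_length_of_missing_array _list → Spec_get_length_of_missing_array _list (get_length_of_missing_array _list)

-- ===== LEMMAS AND PROOFS =====

lemma pv_anyEmpty_eq (l : List (List Int)) :
    pvA_anyEmpty l = l.any (fun x => decide (x = [])) := by
  induction l with
  | nil => rfl
  | cons x xs ih =>
    by_cases h : x = [] <;> simp [pvA_anyEmpty, h, ih]

-- option minimum (none = no candidate yet)
def pvOmin : Option Int → Option Int → Option Int
  | none, b => b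
  | a, none => a
  | some x, some y => some (min x y)

-- the minimum rank among mismatching values of l (r = rank function, i = base length)
def pvCandMin (i : Int) (r : List Int → Int) : List (List Int) → Option Int
  | [] => none
  | v :: rest =>
    if ¬ (i + r v = (v.length : Int)) then pvOmin (some (r v)) (pvCandMin i r rest)
    else pvCandMin i r rest

lemma pvOmin_none_right (a : Option Int) : pvOmin a none = a := by cases a <;> rfl

-- B's loop computes pvOmin best (pvCandMin …)
lemma pvB_loop_eq (full : List (List Int)) (i : Int) (l : List (List Int)) :
    ∀ best, pvB_loop full i best l
      = pvOmin best (pvCandMin i (fun v => (full.countP (fun y => decide (y < v)) : Int)) l) := by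
  induction l with
  | nil => intro best; simp [pvB_loop, pvCandMin, pvOmin_none_right]
  | cons v rest ih =>
    intro best
    simp only [pvB_loop, pvCandMin]
    set c : Int := (full.countP (fun y => decide (y < v)) : Int) with hc
    by_cases hmis : ¬ (i + c = (v.length : Int))
    · rw [if_pos hmis, if_pos hmis]
      cases best with
      | none => rw [ih]; rfl
      | some b =>
        dsimp only
        by_cases hlt : c < b
        · rw [if_pos hlt, ih]
          cases pvCandMin i _ rest with
          | none => simp [pvOmin]; omega
          | some d => simp [pvOmin]; omega
        · rw [if_neg hlt, ih]
          cases pvCandMin i _ rest with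
          | none => simp [pvOmin]; omega
          | some d => simp [pvOmin]; omega
    · rw [if_neg hmis, if_neg hmis, ih]

-- pvCandMin is invariant under permutation of the scanned list
lemma pvCandMin_perm (i : Int) (r : List Int → Int) {l₁ l₂ : List (List Int)}
    (h : l₁.Perm l₂) : pvCandMin i r l₁ = pvCandMin i r l₂ := by
  induction h with
  | nil => rfl
  | cons x _ ih => simp only [pvCandMin, ih]
  | swap x y l =>
    simp only [pvCandMin]
    by_cases hx : ¬ (i + r x = (x.length : Int)) <;>
      by_cases hy : ¬ (i + r y = (y.length : Int)) <;>
      simp only [hx, hy, ite_not] <;>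
      [skip; rfl; rfl; rfl]
    cases pvCandMin i r l with
    | none => simp [pvOmin]; omega
    | some d => simp [pvOmin]; omega
  | trans _ _ ih₁ ih₂ => exact ih₁.trans ih₂

-- every candidate produced from l has rank ≥ a, so the candidate min is ≥ a
lemma pvCandMin_ge (i a : Int) (r : List Int → Int) (l : List (List Int))
    (h : ∀ v ∈ l, a ≤ r v) :
    pvCandMin i r l = none ∨ ∃ b, pvCandMin i r l = some b ∧ a ≤ b := by
  induction l with
  | nil => exact Or.inl rfl
  | cons v rest ih =>
    have hv : a ≤ r v := h v (by simp)
    have hrest := ih (fun w hw => h w (by simp [hw]))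
    simp only [pvCandMin]
    by_cases hmis : ¬ (i + r v = (v.length : Int))
    · rw [if_pos hmis]
      rcases hrest with hn | ⟨b, hb, hab⟩
      · rw [hn]; exact Or.inr ⟨r v, rfl, hv⟩
      · rw [hb]; exact Or.inr ⟨min (r v) b, rfl, le_min hv hab⟩
    · rw [if_neg hmis]; exact hrest

-- A's scan over a sorted suffix returns the candidate minimum, given that .index yields the rank
lemma pvA_loop_eq_candMin (s : List (List Int)) (i : Int) (r : List Int → Int)
    (hmono : ∀ v w : List Int, v ≤ w → r v ≤ r w) :
    ∀ l : List (List Int), l.Pairwise (fun a b => a ≤ b) →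
      (∀ v ∈ l, ((PySem.List.index? s v).getD 0 : Int) = r v) →
      pvA_loop s i l = (match pvCandMin i r l with | none => 0 | some c => i + c) := by
  intro l
  induction l with
  | nil => intro _ _; rfl
  | cons v rest ih =>
    intro hpw hidx
    have hpc := List.pairwise_cons.mp hpw
    have hv := hidx v (by simp)
    simp only [pvA_loop, pvCandMin, hv]
    by_cases hmis : ¬ (i + r v = (v.length : Int))
    · rw [if_pos hmis, if_pos hmis]
      have hge : ∀ w ∈ rest, r v ≤ r w := fun w hw => hmono v w (hpc.1 w hw)
      rcases pvCandMin_ge i (r v) r rest hge with hn | ⟨b, hb, hab⟩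
      · rw [hn]; rfl
      · rw [hb]
        simp only [pvOmin]
        rw [min_eq_left hab]
    · rw [if_neg hmis, if_neg hmis]
      exact ih hpc.2 (fun w hw => hidx w (by simp [hw]))

-- on a sorted list, .index of a member is the count of strictly smaller elements
lemma pv_index_eq_rank (s : List (List Int)) (hpw : s.Pairwise (fun a b => a ≤ b))
    (v : List Int) (hv : v ∈ s) :
    ((PySem.List.index? s v).getD 0 : Int) = (s.countP (fun y => decide (y < v)) : Int) := by
  obtain ⟨k, hk⟩ := Option.isSome_iff_exists.mp ((PySem.List.index?_isSome_iff s v).mpr hv)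
  obtain ⟨pre, suf, hs, hlen, hvpre⟩ := (PySem.List.index?_eq_some_iff s v k).mp hk
  rw [hk]
  subst hs
  have hpre : ∀ p ∈ pre, p < v := by
    intro p hp
    have hle : p ≤ v := (List.pairwise_append.mp hpw).2.2 p hp v (by simp)
    exact lt_of_le_of_ne hle (fun he => hvpre (he ▸ hp))
  have hsuf : ∀ z ∈ v :: suf, ¬ z < v := by
    intro z hz
    rcases List.mem_cons.mp hz with hz | hz
    · simp [hz]
    · have hvz : v ≤ z := (List.pairwise_append.mp hpw).2.1.rel_head_tail hz
      exact not_lt_of_ge hvz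
  have h1 : pre.countP (fun y => decide (y < v)) = pre.length := by
    rw [List.countP_eq_length]
    intro p hp; exact decide_eq_true (hpre p hp)
  have h2 : (v :: suf).countP (fun y => decide (y < v)) = 0 := by
    rw [List.countP_eq_zero]
    intro z hz; simpa using hsuf z hz
  rw [List.countP_append, h1, h2, hlen]
  simp

-- ===== VERDICT (by name: the statement is the Claim_ definition above) =====
theorem get_length_of_missing_array_spec : Claim_equal_get_length_of_missing_array := by
  intro _list _
  unfold Spec_get_length_of_missing_array
  unfold get_length_of_missing_array get_length_of_missing_array_alt
  rw [pv_anyEmpty_eq]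
  by_cases h0 : _list = []
  · simp [h0]
  · rw [if_neg h0, if_neg h0]
    by_cases h1 : _list.any (fun x => decide (x = []))
    · rw [if_pos h1, if_pos h1]
    · rw [if_neg h1, if_neg h1]
      cases hsorted : PySem.List.sorted _list (fun x => x) false with
      | nil =>
        exact absurd ((PySem.List.sorted_eq_nil_iff _list (fun x => x) false).mp hsorted) h0
      | cons h t =>
        have hperm : (h :: t).Perm _list := hsorted ▸ PySem.List.sorted_perm _list (fun x => x) false
        have hpw : List.Pairwise (fun a b => a ≤ b) (h :: t) := by
          rw [← hsorted]
          have e : PySem.List.sorted _list (fun x => x) false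
              = @PySem.List.sorted (List Int) (List Int) List.instLinearOrder.toLT
                  LinearOrder.toDecidableLT _list (fun x => x) false := by
            congr 1
          rw [e]
          exact PySem.List.sorted_pairwise (κ := List Int) _list (fun x => x)
        -- min? _list = some h
        have hne : PySem.List.min? _list (fun x => x) ≠ none := by
          rw [Ne, PySem.List.min?_eq_none_iff]; exact h0
        obtain ⟨m, hm⟩ := Option.ne_none_iff_exists'.mp hne
        have hmmem : m ∈ _list := PySem.List.min?_mem hm
        have hm' : @PySem.List.min? (List Int) (List Int) LinearOrder.toPartialOrder.toLT
            LinearOrder.toDecidableLT _list (fun x => x) = some m := by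
          rw [← hm]; congr 1
        have hmin : ∀ y ∈ _list, m ≤ y := by simpa using PySem.List.min?_isMin hm'
        have hsorted' : @PySem.List.sorted (List Int) (List Int) LinearOrder.toPartialOrder.toLT
            LinearOrder.toDecidableLT _list (fun x => x) false = h :: t := by
          rw [← hsorted]; congr 1
        have hhead : ∀ y ∈ _list, h ≤ y := by
          intro y hy
          simpa using PySem.List.key_head_sorted_le (xs := _list) (key := fun x => x) hsorted' y hy
        have hmh : m = h := le_antisymm (hmin h (hperm.mem_iff.mp (by simp)))
          (hhead m hmmem)
        rw [hm, hmh]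
        -- ranks: countP over _list = countP over the sorted list
        set r : List Int → Int := fun v => (_list.countP (fun y => decide (y < v)) : Int) with hr
        have hrs : ∀ v, ((h :: t).countP (fun y => decide (y < v)) : Int) = r v := by
          intro v; rw [hr]; exact_mod_cast congrArg _ (hperm.countP_eq _)
        have hmono : ∀ v w : List Int, v ≤ w → r v ≤ r w := by
          intro v w hvw
          show ((_list.countP (fun y => decide (y < v)) : Nat) : Int)
            ≤ ((_list.countP (fun y => decide (y < w)) : Nat) : Int)
          have := List.countP_mono_left (l := _list)
            (p := fun y => decide (y < v)) (q := fun y => decide (y < w))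
            (fun y _ hy => decide_eq_true (lt_of_lt_of_le (of_decide_eq_true hy) hvw))
          exact_mod_cast this
        have hidx : ∀ v ∈ (h :: t), ((PySem.List.index? (h :: t) v).getD 0 : Int) = r v := by
          intro v hv
          rw [pv_index_eq_rank (h :: t) hpw v hv, hrs]
        dsimp only
        rw [pvA_loop_eq_candMin (h :: t) ((h.length : Int)) r hmono (h :: t) hpw hidx]
        rw [pvB_loop_eq _list ((h.length : Int)) _list none]
        have : pvCandMin ((h.length : Int)) r (h :: t)
            = pvCandMin ((h.length : Int))
                (fun v => (_list.countP (fun y => decide (y < v)) : Int)) _list := by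
          rw [← hr]
          exact pvCandMin_perm _ r hperm
        rw [← this]
        cases pvCandMin ((h.length : Int)) r (h :: t) <;> rfl
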